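-- pv_equiv track=rewrite | github.com/altoid/leetcode | py/rain_water_42.py | fill_level
-- ===== SOURCE A (Python) =====
-- def next_hole_at_level(arr, level):
--     """
--     give me the array slice of the next slot we can fill at this level.  return None if no candidates.
--     """
--     i = 0
--     while i < len(arr) and arr[i] <= level:
--         i += 1
--
--     if i == len(arr):
--         return None
--
--     # arr[i] > level
--     while i < len(arr) and arr[i] > level:
--         i += 1
--
--     if i == len(arr):
--         return None
--
--     # arr[i] == level and is to the right of something taller.
--
--     j = i
--     while j < len(arr) and arr[j] <= level:
--         j += 1
--
--     if j == len(arr):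
--         return None
--
--     # are we here?  then there is some element to the left of [i] that is bigger than level, so we have a cistern.
--     return i, j
--
-- def fill_level(arr, level):
--     result = 0
--
--     slice = next_hole_at_level(arr, level)
--     while slice is not None:
--         i, j = slice
--         delta = j - i
--         arr = arr[:i] + [level + 1] * delta + arr[j:]
--         result += delta
--         slice = next_hole_at_level(arr, level)
--
--     return result, arr
-- ===== SOURCE B (Python) =====
-- # Single O(n) pass: a cell <= level gets filled with level+1 iff it has a cell
-- # > level somewhere to its left AND to its right; count the filled cells.
-- def fill_level(arr, level):
--     # cells before the first wall (> level) are never filled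
--     k = 0
--     while k < len(arr) and arr[k] <= level:
--         k += 1
--     prefix, rest = arr[:k], arr[k:]
--     # walk rest right-to-left: fill cells <= level that have a wall to the right
--     count = 0
--     wall = False
--     tail = []
--     for x in reversed(rest):
--         if x > level:
--             wall = True
--             tail.append(x)
--         elif wall:
--             count += 1
--             tail.append(level + 1)
--         else:
--             tail.append(x)
--     tail.reverse()
--     return count, prefix + tail
-- ===== Notes on version B (the rewrite author's own statement) =====
-- stated objective: faster
-- what changed: A repeatedly rescans the whole array from index 0 and refills one hole per pass until none remain; B computes the result in a single linear sweep (skip the unwalled prefix, then one right-to-left pass filling every cell <= level that has a wall on its right), no rescanning.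
import Mathlib
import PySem

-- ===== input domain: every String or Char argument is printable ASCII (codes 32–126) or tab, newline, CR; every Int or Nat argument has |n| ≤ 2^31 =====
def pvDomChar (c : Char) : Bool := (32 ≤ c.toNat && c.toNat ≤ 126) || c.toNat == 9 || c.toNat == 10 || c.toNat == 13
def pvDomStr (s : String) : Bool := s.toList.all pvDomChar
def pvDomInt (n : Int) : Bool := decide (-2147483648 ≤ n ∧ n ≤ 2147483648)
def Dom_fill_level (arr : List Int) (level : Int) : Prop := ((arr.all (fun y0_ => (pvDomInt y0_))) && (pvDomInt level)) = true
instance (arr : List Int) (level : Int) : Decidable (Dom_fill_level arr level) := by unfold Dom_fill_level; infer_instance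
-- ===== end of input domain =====

-- B replaces A's repeated quadratic rescan-and-refill with one takeWhile scan plus one
-- right-to-left pass (fill a cell ≤ level iff a wall > level lies on both sides); objective: faster.

-- ===== PORT A =====
-- generic skip-while loop: 'while i < len(arr) and p(arr[i]): i += 1' (each of A's three
-- loops); fuel = arr.length always suffices, it only makes the recursion structural
def skipP (p : Int → Bool) (arr : List Int) : Nat → Nat → Nat
  | 0, i => i
  | fuel + 1, i =>
    if i < arr.length ∧ p (arr.getD i 0) = true then skipP p arr fuel (i + 1) else i

def next_hole_at_level (arr : List Int) (level : Int) : Option (Nat × Nat) :=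
  let i0 := skipP (fun x => decide (x ≤ level)) arr arr.length 0
  if i0 = arr.length then none
  else
    let i := skipP (fun x => decide (level < x)) arr arr.length i0
    if i = arr.length then none
    else
      let j := skipP (fun x => decide (x ≤ level)) arr arr.length i
      if j = arr.length then none
      else some (i, j)

-- 'while slice is not None': each round fills ≥ 1 cell ≤ level with level+1, so
-- countP (≤ level) + 1 rounds of fuel always suffice; fuel only makes the recursion structural
def fill_loop : Nat → List Int → Int → Int → Int × List Int
  | 0, arr, _, result => (result, arr)
  | fuel + 1, arr, level, result =>
    match next_hole_at_level arr level with
    | none => (result, arr)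
    | some (i, j) =>
        fill_loop fuel (arr.take i ++ List.replicate (j - i) (level + 1) ++ arr.drop j) level
          (result + ((j - i : Nat) : Int))

def fill_level (arr : List Int) (level : Int) : Int × List Int :=
  fill_loop (arr.countP (fun x => decide (x ≤ level)) + 1) arr level 0

-- ===== PORT B =====
-- 'while k < len(arr) and arr[k] <= level: k += 1' (fuel = arr.length always suffices)
def altSkip (arr : List Int) (level : Int) : Nat → Nat → Nat
  | 0, k => k
  | fuel + 1, k =>
    if k < arr.length ∧ arr.getD k 0 ≤ level then altSkip arr level fuel (k + 1) else k

-- the body of B's for-loop over reversed(rest); state = (count, wall, tail)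
def altStep (level : Int) (st : Int × Bool × List Int) (x : Int) : Int × Bool × List Int :=
  if level < x then (st.1, true, st.2.2 ++ [x])
  else if st.2.1 then (st.1 + 1, true, st.2.2 ++ [level + 1])
  else (st.1, false, st.2.2 ++ [x])

def fill_level_alt (arr : List Int) (level : Int) : Int × List Int :=
  let k := altSkip arr level arr.length 0
  let pre := arr.take k
  let rest := arr.drop k
  let s := rest.reverse.foldl (altStep level) (0, false, ([] : List Int))
  (s.1, pre ++ s.2.2.reverse)

-- ===== PRECONDITION & SPEC =====
def Spec_fill_level (arr : List Int) (level : Int) (out : Int × List Int) : Prop := out = fill_level_alt arr level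
instance (arr : List Int) (level : Int) (out : Int × List Int) : Decidable (Spec_fill_level arr level out) := by unfold Spec_fill_level; infer_instance

-- ===== CLAIM (what is proved, stated in full; the proofs are below) =====
def Claim_equal_fill_level : Prop := ∀ (arr : List Int) (level : Int), Dom_fill_level arr level → Spec_fill_level arr level (fill_level arr level)

-- ===== LEMMAS AND PROOFS =====

-- value of a fueled skip-while loop once the fuel covers the remaining length
theorem skipP_eq (p : Int → Bool) (arr : List Int) :
    ∀ fuel i, arr.length ≤ fuel + i →
      skipP p arr fuel i = i + ((arr.drop i).takeWhile p).length := by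
  intro fuel
  induction fuel with
  | zero =>
    intro i h0
    rw [skipP, List.drop_eq_nil_of_le (by omega)]
    simp
  | succ fuel ih =>
    intro i h0
    rw [skipP]
    by_cases hc : i < arr.length ∧ p (arr.getD i 0) = true
    · have hdrop : arr.drop i = arr[i] :: arr.drop (i + 1) := List.drop_eq_getElem_cons hc.1
      have hget : arr.getD i 0 = arr[i] := List.getD_eq_getElem arr 0 hc.1
      rw [if_pos hc, ih (i + 1) (by omega), hdrop,
        List.takeWhile_cons_of_pos (by rw [← hget]; exact hc.2), List.length_cons]
      omega
    · rw [if_neg hc]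
      by_cases hi : i < arr.length
      · have hdrop : arr.drop i = arr[i] :: arr.drop (i + 1) := List.drop_eq_getElem_cons hi
        have hget : arr.getD i 0 = arr[i] := List.getD_eq_getElem arr 0 hi
        have hp : ¬ p arr[i] = true := by rw [← hget]; tauto
        rw [hdrop, List.takeWhile_cons_of_neg (by simpa using hp)]
        simp
      · rw [List.drop_eq_nil_of_le (by omega)]
        simp

-- dependent-elimination-friendly form of List.head_dropWhile_not
theorem dropWhile_head_false {p : Int → Bool} {l : List Int} {c : Int} {t : List Int}
    (h : l.dropWhile p = c :: t) : p c = false := by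
  induction l with
  | nil => simp at h
  | cons a l ih =>
    rw [List.dropWhile_cons] at h
    by_cases hp : p a
    · rw [if_pos hp] at h; exact ih h
    · rw [if_neg hp] at h
      cases h
      simpa using hp

-- structure of a hole found by next_hole_at_level
theorem next_hole_some (arr : List Int) (level : Int) (i j : Nat)
    (h : next_hole_at_level arr level = some (i, j)) :
    ∃ P W M g S,
      P = arr.takeWhile (fun x => decide (x ≤ level)) ∧
      arr = P ++ W ++ M ++ g :: S ∧
      (∀ x ∈ W, level < x) ∧ (∀ x ∈ M, x ≤ level) ∧
      W ≠ [] ∧ M ≠ [] ∧ level < g ∧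
      i = P.length + W.length ∧ j = i + M.length := by
  set P := arr.takeWhile (fun x => decide (x ≤ level)) with hPdef
  set S0 := arr.dropWhile (fun x => decide (x ≤ level)) with hS0def
  have harr0 : arr = P ++ S0 := (List.takeWhile_append_dropWhile).symm
  have hlen0 : arr.length = P.length + S0.length := by rw [harr0, List.length_append]
  set W := S0.takeWhile (fun x => decide (level < x)) with hWdef
  set S1 := S0.dropWhile (fun x => decide (level < x)) with hS1def
  have hS0 : S0 = W ++ S1 := (List.takeWhile_append_dropWhile).symm
  have hlen1 : S0.length = W.length + S1.length := by rw [hS0, List.length_append]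
  set M := S1.takeWhile (fun x => decide (x ≤ level)) with hMdef
  set S2 := S1.dropWhile (fun x => decide (x ≤ level)) with hS2def
  have hS1 : S1 = M ++ S2 := (List.takeWhile_append_dropWhile).symm
  have hlen2 : S1.length = M.length + S2.length := by rw [hS1, List.length_append]
  have hdrop0 : arr.drop P.length = S0 := by rw [harr0]; exact List.drop_left ..
  have hdrop1 : arr.drop (P.length + W.length) = S1 := by
    rw [harr0, List.drop_length_add_append, hS0]
    exact List.drop_left ..
  have hskip0 : skipP (fun x => decide (x ≤ level)) arr arr.length 0 = P.length := by
    rw [skipP_eq _ arr arr.length 0 (by omega)]; simp [hPdef]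
  have hskip1 : skipP (fun x => decide (level < x)) arr arr.length P.length
      = P.length + W.length := by
    rw [skipP_eq _ arr arr.length P.length (by omega), hdrop0]
  have hskip2 : skipP (fun x => decide (x ≤ level)) arr arr.length (P.length + W.length)
      = P.length + W.length + M.length := by
    rw [skipP_eq _ arr arr.length (P.length + W.length) (by omega), hdrop1]
  simp only [next_hole_at_level, hskip0, hskip1, hskip2] at h
  split_ifs at h with hc0 hc1 hc2
  have h' := Option.some.inj h
  injection h' with hi hj
  -- S0 is nonempty and starts with a wall, so W ≠ []
  have hS0ne : S0 ≠ [] := by intro he; rw [he] at hlen0; simp at hlen0; omega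
  obtain ⟨c0, t0, hc0t⟩ := List.exists_cons_of_ne_nil hS0ne
  have hc0gt : level < c0 := by
    have := dropWhile_head_false (hS0def.symm.trans hc0t)
    simpa using this
  have hWne : W ≠ [] := by
    rw [hWdef, hc0t, List.takeWhile_cons_of_pos (by simpa using hc0gt)]
    simp
  -- S1 is nonempty and starts with a low cell, so M ≠ []
  have hS1ne : S1 ≠ [] := by intro he; rw [he] at hlen1; simp at hlen1; omega
  obtain ⟨c1, t1, hc1t⟩ := List.exists_cons_of_ne_nil hS1ne
  have hc1le : c1 ≤ level := by
    have := dropWhile_head_false (hS1def.symm.trans hc1t)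
    simpa using this
  have hMne : M ≠ [] := by
    rw [hMdef, hc1t, List.takeWhile_cons_of_pos (by simpa using hc1le)]
    simp
  -- S2 is nonempty and starts with a wall
  have hS2ne : S2 ≠ [] := by intro he; rw [he] at hlen2; simp at hlen2; omega
  obtain ⟨g, S, hgS⟩ := List.exists_cons_of_ne_nil hS2ne
  have hggt : level < g := by
    have := dropWhile_head_false (hS2def.symm.trans hgS)
    simpa using this
  refine ⟨P, W, M, g, S, rfl, ?_, ?_, ?_, hWne, hMne, hggt, hi.symm, by omega⟩
  · rw [harr0, hS0, hS1, hgS]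
    simp [List.append_assoc]
  · intro x hx
    have := List.mem_takeWhile_imp hx
    simpa using this
  · intro x hx
    have := List.mem_takeWhile_imp hx
    simpa using this

-- the cells filled in one round all counted ≤ level and are replaced by level+1 > level
theorem fill_decrease (arr : List Int) (level : Int) (i j : Nat)
    (h : next_hole_at_level arr level = some (i, j)) :
    (arr.take i ++ List.replicate (j - i) (level + 1) ++ arr.drop j).countP
        (fun x => decide (x ≤ level)) < arr.countP (fun x => decide (x ≤ level)) := by
  obtain ⟨P, W, M, g, S, _, harr, hW, hM, hWne, hMne, hg, hi, hj⟩ := next_hole_some arr level i j h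
  have htake : arr.take i = P ++ W := by
    rw [harr, hi, show P ++ W ++ M ++ g :: S = (P ++ W) ++ (M ++ g :: S) by
      simp [List.append_assoc], ← List.length_append]
    exact List.take_left ..
  have hdropj : arr.drop j = g :: S := by
    rw [harr, hj, hi, show P ++ W ++ M ++ g :: S = (P ++ W ++ M) ++ g :: S by
      simp [List.append_assoc], show P.length + W.length + M.length = (P ++ W ++ M).length by
      simp; omega]
    exact List.drop_left ..
  have hsub : j - i = M.length := by omega
  have hcW : W.countP (fun x => decide (x ≤ level)) = 0 :=
    List.countP_eq_zero.mpr (fun a ha => by have := hW a ha; simpa using by omega)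
  have hcM : M.countP (fun x => decide (x ≤ level)) = M.length :=
    List.countP_eq_length.mpr (fun a ha => by simpa using hM a ha)
  have hcR : (List.replicate M.length (level + 1)).countP (fun x => decide (x ≤ level)) = 0 :=
    List.countP_eq_zero.mpr (fun a ha => by
      have := List.eq_of_mem_replicate ha
      subst this
      simp)
  have hMlen : 0 < M.length := List.length_pos_iff.mpr hMne
  rw [htake, hdropj, hsub]
  conv_rhs => rw [harr]
  simp only [List.countP_append, hcW, hcM, hcR]
  omega


-- right-to-left fill: (count, filled list, does this suffix contain a wall > level?)
def rF (level : Int) : List Int → Int × List Int × Bool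
  | [] => (0, [], false)
  | x :: xs =>
    let r := rF level xs
    if level < x then (r.1, x :: r.2.1, true)
    else if r.2.2 then (r.1 + 1, (level + 1) :: r.2.1, true)
    else (r.1, x :: r.2.1, false)

-- common functional description both ports are reduced to
def Tspec (arr : List Int) (level : Int) : Int × List Int :=
  let p := arr.takeWhile (fun x => decide (x ≤ level))
  let s := arr.dropWhile (fun x => decide (x ≤ level))
  ((rF level s).1, p ++ (rF level s).2.1)

theorem rF_gt_prefix (level : Int) (W ys : List Int) (hW : ∀ x ∈ W, level < x) :
    rF level (W ++ ys) = ((rF level ys).1, W ++ (rF level ys).2.1, (!W.isEmpty || (rF level ys).2.2)) := by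
  induction W with
  | nil => simp
  | cons w W ih =>
    have hw : level < w := hW w (by simp)
    simp only [List.cons_append, rF, ih (fun x hx => hW x (by simp [hx])), if_pos hw]
    simp

theorem rF_le_prefix_wall (level : Int) (M ys : List Int) (hM : ∀ x ∈ M, x ≤ level)
    (hw : (rF level ys).2.2 = true) :
    rF level (M ++ ys) = ((rF level ys).1 + M.length,
      List.replicate M.length (level + 1) ++ (rF level ys).2.1, true) := by
  induction M with
  | nil => rw [List.nil_append, ← hw]; simp
  | cons m M ih =>
    have hm : m ≤ level := hM m (by simp)
    have ih' := ih (fun x hx => hM x (by simp [hx]))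
    simp only [List.cons_append, rF, ih', if_neg (by omega : ¬ level < m)]
    simp [List.replicate_succ]
    ring

theorem rF_le_prefix_nowall (level : Int) (M ys : List Int) (hM : ∀ x ∈ M, x ≤ level)
    (hw : (rF level ys).2.2 = false) :
    rF level (M ++ ys) = ((rF level ys).1, M ++ (rF level ys).2.1, false) := by
  induction M with
  | nil => rw [List.nil_append, ← hw]; simp
  | cons m M ih =>
    have hm : m ≤ level := hM m (by simp)
    have ih' := ih (fun x hx => hM x (by simp [hx]))
    simp only [List.cons_append, rF, ih', if_neg (by omega : ¬ level < m)]
    simp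

theorem takeWhile_drop_decomp (level : Int) (P ys : List Int) (g : Int) (t : List Int)
    (hP : ∀ x ∈ P, x ≤ level) (hys : ys = g :: t) (hg : level < g) :
    (P ++ ys).takeWhile (fun x => decide (x ≤ level)) = P ∧
    (P ++ ys).dropWhile (fun x => decide (x ≤ level)) = ys := by
  induction P with
  | nil =>
    subst hys
    rw [List.nil_append]
    exact ⟨List.takeWhile_cons_of_neg (by simp; omega), List.dropWhile_cons_of_neg (by simp; omega)⟩
  | cons p P ih =>
    have hp : p ≤ level := hP p (by simp)
    have ih' := ih (fun x hx => hP x (by simp [hx]))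
    simp [hp, ih'.1, ih'.2]

-- if next_hole found nothing, no cell has walls on both sides: Tspec leaves arr unchanged
theorem next_hole_none_T (arr : List Int) (level : Int)
    (h : next_hole_at_level arr level = none) : Tspec arr level = (0, arr) := by
  set P := arr.takeWhile (fun x => decide (x ≤ level)) with hPdef
  set S0 := arr.dropWhile (fun x => decide (x ≤ level)) with hS0def
  have harr0 : arr = P ++ S0 := (List.takeWhile_append_dropWhile).symm
  have hlen0 : arr.length = P.length + S0.length := by rw [harr0, List.length_append]
  set W := S0.takeWhile (fun x => decide (level < x)) with hWdef
  set S1 := S0.dropWhile (fun x => decide (level < x)) with hS1def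
  have hS0 : S0 = W ++ S1 := (List.takeWhile_append_dropWhile).symm
  have hlen1 : S0.length = W.length + S1.length := by rw [hS0, List.length_append]
  set M := S1.takeWhile (fun x => decide (x ≤ level)) with hMdef
  set S2 := S1.dropWhile (fun x => decide (x ≤ level)) with hS2def
  have hS1 : S1 = M ++ S2 := (List.takeWhile_append_dropWhile).symm
  have hlen2 : S1.length = M.length + S2.length := by rw [hS1, List.length_append]
  have hdrop0 : arr.drop P.length = S0 := by rw [harr0]; exact List.drop_left ..
  have hdrop1 : arr.drop (P.length + W.length) = S1 := by
    rw [harr0, List.drop_length_add_append, hS0]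
    exact List.drop_left ..
  have hskip0 : skipP (fun x => decide (x ≤ level)) arr arr.length 0 = P.length := by
    rw [skipP_eq _ arr arr.length 0 (by omega)]; simp [hPdef]
  have hskip1 : skipP (fun x => decide (level < x)) arr arr.length P.length
      = P.length + W.length := by
    rw [skipP_eq _ arr arr.length P.length (by omega), hdrop0]
  have hskip2 : skipP (fun x => decide (x ≤ level)) arr arr.length (P.length + W.length)
      = P.length + W.length + M.length := by
    rw [skipP_eq _ arr arr.length (P.length + W.length) (by omega), hdrop1]
  have hW : ∀ x ∈ W, level < x := fun x hx => by simpa using List.mem_takeWhile_imp hx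
  have hM : ∀ x ∈ M, x ≤ level := fun x hx => by simpa using List.mem_takeWhile_imp hx
  simp only [next_hole_at_level, hskip0, hskip1, hskip2] at h
  split_ifs at h with hc0 hc1 hc2
  · -- everything is ≤ level: S0 = []
    have hnil : S0 = [] := List.length_eq_zero_iff.mp (by omega)
    simp only [Tspec, ← hPdef, ← hS0def, hnil]
    simp [rF, harr0, hnil]
  · -- arr = P ++ W with no cell after the walls: S1 = []
    have hnil : S1 = [] := List.length_eq_zero_iff.mp (by omega)
    have hS0W : S0 = W := by rw [hS0, hnil, List.append_nil]
    simp only [Tspec, ← hPdef, ← hS0def, hS0W]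
    rw [← List.append_nil W, rF_gt_prefix _ _ _ hW]
    simp [rF]
    rw [harr0, hS0W]
  · -- arr = P ++ W ++ M with no closing wall: S2 = []
    have hnil : S2 = [] := List.length_eq_zero_iff.mp (by omega)
    have hS1M : S1 = M := by rw [hS1, hnil, List.append_nil]
    simp only [Tspec, ← hPdef, ← hS0def, hS0, hS1M]
    rw [show W ++ M = W ++ (M ++ []) by simp, rF_gt_prefix _ _ _ hW,
      rF_le_prefix_nowall _ _ _ hM (by simp [rF])]
    simp [rF]
    rw [harr0, hS0, hS1M]

-- one round of A's loop removes exactly the leftmost hole, which Tspec fills identically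
theorem fill_loop_eq (level : Int) :
    ∀ fuel arr (r : Int), arr.countP (fun x => decide (x ≤ level)) < fuel →
      fill_loop fuel arr level r = (r + (Tspec arr level).1, (Tspec arr level).2) := by
  intro fuel
  induction fuel with
  | zero => intro arr r hn; omega
  | succ fuel ih =>
    intro arr r hn
    rw [fill_loop]
    split
    · next heq =>
      rw [next_hole_none_T arr level heq]
      simp
    · next i j heq =>
      obtain ⟨P, W, M, g, S, hPdef, harr, hW, hM, hWne, hMne, hg, hi, hj⟩ :=
        next_hole_some arr level i j heq
      have hP : ∀ x ∈ P, x ≤ level := by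
        intro x hx
        rw [hPdef] at hx
        have := List.mem_takeWhile_imp (p := fun y => decide (y ≤ level)) hx
        simpa using this
      have hwallg : (rF level (g :: S)).2.2 = true := by simp [rF, hg]
      have hrepl : ∀ x ∈ List.replicate M.length (level + 1), level < x := fun x hx => by
        have := List.eq_of_mem_replicate hx
        omega
      have htake : arr.take i = P ++ W := by
        rw [harr, hi, show P ++ W ++ M ++ g :: S = (P ++ W) ++ (M ++ g :: S) by
          simp [List.append_assoc], ← List.length_append]
        exact List.take_left ..
      have hdropj : arr.drop j = g :: S := by
        rw [harr, hj, hi, show P ++ W ++ M ++ g :: S = (P ++ W ++ M) ++ g :: S by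
          simp [List.append_assoc], show P.length + W.length + M.length = (P ++ W ++ M).length by
          simp; omega]
        exact List.drop_left ..
      have hsub : j - i = M.length := by omega
      have hdw : arr.dropWhile (fun x => decide (x ≤ level)) = W ++ (M ++ g :: S) := by
        have h1 : arr.takeWhile (fun x => decide (x ≤ level))
              ++ arr.dropWhile (fun x => decide (x ≤ level))
            = arr.takeWhile (fun x => decide (x ≤ level)) ++ (W ++ (M ++ g :: S)) := by
          rw [List.takeWhile_append_dropWhile]
          conv_rhs => rw [← hPdef]
          conv_lhs => rw [harr]
          simp [List.append_assoc]
        exact List.append_cancel_left h1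
      have hTarr : Tspec arr level = ((rF level (g :: S)).1 + M.length,
          P ++ (W ++ (List.replicate M.length (level + 1) ++ (rF level (g :: S)).2.1))) := by
        simp only [Tspec]
        rw [← hPdef, hdw, rF_gt_prefix _ _ _ hW, rF_le_prefix_wall _ _ _ hM hwallg]
      have hnew : arr.take i ++ List.replicate (j - i) (level + 1) ++ arr.drop j
          = P ++ (W ++ (List.replicate M.length (level + 1) ++ (g :: S))) := by
        rw [htake, hdropj, hsub]
        simp [List.append_assoc]
      have hTnew : Tspec (P ++ (W ++ (List.replicate M.length (level + 1) ++ (g :: S)))) level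
          = ((rF level (g :: S)).1,
             P ++ (W ++ (List.replicate M.length (level + 1) ++ (rF level (g :: S)).2.1))) := by
        obtain ⟨w, W', hwW⟩ := List.exists_cons_of_ne_nil hWne
        have hdec := takeWhile_drop_decomp level P
          (W ++ (List.replicate M.length (level + 1) ++ (g :: S)))
          w (W' ++ (List.replicate M.length (level + 1) ++ (g :: S))) hP
          (by rw [hwW]; simp) (hW w (by rw [hwW]; simp))
        simp only [Tspec]
        rw [hdec.1, hdec.2, rF_gt_prefix _ _ _ hW, rF_gt_prefix _ _ _ hrepl]
      have hlt : (P ++ (W ++ (List.replicate M.length (level + 1) ++ (g :: S)))).countP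
          (fun x => decide (x ≤ level)) < fuel := by
        rw [← hnew]
        have := fill_decrease arr level i j heq
        omega
      rw [hnew, ih _ (r + ((j - i : Nat) : Int)) hlt, hTnew, hTarr]
      rw [Prod.mk.injEq]
      constructor
      · rw [hsub]
        push_cast
        ring
      · rfl

theorem foldl_rev_rF (level : Int) (xs : List Int) :
    xs.reverse.foldl (altStep level) (0, false, ([] : List Int)) =
      ((rF level xs).1, (rF level xs).2.2, (rF level xs).2.1.reverse) := by
  induction xs with
  | nil => simp [rF]
  | cons x xs ih =>
    rw [List.reverse_cons, List.foldl_append, ih]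
    simp only [List.foldl_cons, List.foldl_nil, altStep, rF]
    by_cases hx : level < x
    · simp [hx]
    · by_cases hw : (rF level xs).2.2 <;> simp [hx, hw]

-- value of B's fueled prefix-scan loop once the fuel covers the remaining length
theorem altSkip_eq (arr : List Int) (level : Int) :
    ∀ fuel k, arr.length ≤ fuel + k →
      altSkip arr level fuel k
        = k + ((arr.drop k).takeWhile (fun x => decide (x ≤ level))).length := by
  intro fuel
  induction fuel with
  | zero =>
    intro k h0
    rw [altSkip, List.drop_eq_nil_of_le (by omega)]
    simp
  | succ fuel ih =>
    intro k h0
    rw [altSkip]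
    by_cases hc : k < arr.length ∧ arr.getD k 0 ≤ level
    · have hdrop : arr.drop k = arr[k] :: arr.drop (k + 1) := List.drop_eq_getElem_cons hc.1
      have hget : arr.getD k 0 = arr[k] := List.getD_eq_getElem arr 0 hc.1
      rw [if_pos hc, ih (k + 1) (by omega), hdrop,
        List.takeWhile_cons_of_pos (by simp only [decide_eq_true_eq]; rw [← hget]; exact hc.2),
        List.length_cons]
      omega
    · rw [if_neg hc]
      by_cases hk : k < arr.length
      · have hdrop : arr.drop k = arr[k] :: arr.drop (k + 1) := List.drop_eq_getElem_cons hk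
        have hget : arr.getD k 0 = arr[k] := List.getD_eq_getElem arr 0 hk
        have hp : ¬ arr[k] ≤ level := by rw [← hget]; tauto
        rw [hdrop, List.takeWhile_cons_of_neg (by simpa using hp)]
        simp
      · rw [List.drop_eq_nil_of_le (by omega)]
        simp

theorem alt_eq_Tspec (arr : List Int) (level : Int) : fill_level_alt arr level = Tspec arr level := by
  set P := arr.takeWhile (fun x => decide (x ≤ level)) with hPdef
  set S0 := arr.dropWhile (fun x => decide (x ≤ level)) with hS0def
  have harr0 : arr = P ++ S0 := (List.takeWhile_append_dropWhile).symm
  have hk : altSkip arr level arr.length 0 = P.length := by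
    rw [altSkip_eq arr level arr.length 0 (by omega)]; simp [hPdef]
  have htk : arr.take P.length = P := by rw [harr0]; exact List.take_left ..
  have hdr : arr.drop P.length = S0 := by rw [harr0]; exact List.drop_left ..
  simp only [fill_level_alt, Tspec, ← hPdef, ← hS0def]
  rw [hk, htk, hdr, foldl_rev_rF]
  simp

-- ===== VERDICT (by name: the statement is the Claim_ definition above) =====
theorem fill_level_spec : Claim_equal_fill_level := by
  intro arr level _
  unfold Spec_fill_level
  rw [fill_level, fill_loop_eq level _ arr 0 (by omega), alt_eq_Tspec]
  simp
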